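-- pv_equiv track=rewrite | github.com/KristinaKuzmenko/werewolf_benchmark | src/green_agent/metrics/deterministic_metrics.py | validate_game_history
-- ===== SOURCE A (Python) =====
-- from typing import Dict, List, Optional
--
-- def validate_game_history(game_history: List[Dict]) -> List[str]:
--     """
--     Validate game history for completeness.
--
--     Returns:
--         List of warning messages about missing event types
--     """
--     warnings = []
--
--     required_events = ['speech', 'vote', 'elimination']
--     optional_events = ['identity_claim', 'seer_check', 'protection_saved']
--
--     event_types = {event.get('type') for event in game_history}
--
--     # Check required events
--     for req_type in required_events:
--         if req_type not in event_types:
--             warnings.append(f"Missing required event type: {req_type}")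
--
--     # Check optional events (info only)
--     missing_optional = [opt for opt in optional_events if opt not in event_types]
--     if missing_optional:
--         warnings.append(
--             f"Missing optional event types: {', '.join(missing_optional)} "
--             f"(may affect advanced metrics)"
--         )
--
--     # Check event counts
--     speech_count = sum(1 for e in game_history if e.get('type') == 'speech')
--     vote_count = sum(1 for e in game_history if e.get('type') == 'vote')
--
--     if speech_count == 0:
--         warnings.append("No speech events found (IRS/MSS will be unavailable)")
--     elif speech_count < 10:
--         warnings.append(f"Very few speeches ({speech_count}) - metrics may be unreliable")
--
--     return warnings
-- ===== SOURCE B (Python) =====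
-- def validate_game_history(game_history):
--     # Single pass: strike each seen type off the pending lists and tally speeches;
--     # the leftovers of the pending lists ARE the missing event types, in order.
--     pending_req = ['speech', 'vote', 'elimination']
--     pending_opt = ['identity_claim', 'seer_check', 'protection_saved']
--     speech_count = 0
--     for event in game_history:
--         t = event.get('type')
--         if t == 'speech':
--             speech_count += 1
--         if t in pending_req:
--             pending_req.remove(t)
--         elif t in pending_opt:
--             pending_opt.remove(t)
--     warnings = ["Missing required event type: " + r for r in pending_req]
--     if pending_opt:
--         warnings.append(
--             "Missing optional event types: " + ", ".join(pending_opt)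
--             + " (may affect advanced metrics)"
--         )
--     if speech_count == 0:
--         warnings.append("No speech events found (IRS/MSS will be unavailable)")
--     elif speech_count < 10:
--         warnings.append(f"Very few speeches ({speech_count}) - metrics may be unreliable")
--     return warnings
-- ===== Notes on version B (the rewrite author's own statement) =====
-- stated objective: alternative
-- what changed: B makes one pass that strikes each seen type off pending required/optional lists (list.remove) and tallies speeches as it goes, so the leftover pending lists directly are the missing types; A instead builds a set of types, scans the literal lists with membership tests, and re-scans the history twice more to count speech/vote events.
import Mathlib
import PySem

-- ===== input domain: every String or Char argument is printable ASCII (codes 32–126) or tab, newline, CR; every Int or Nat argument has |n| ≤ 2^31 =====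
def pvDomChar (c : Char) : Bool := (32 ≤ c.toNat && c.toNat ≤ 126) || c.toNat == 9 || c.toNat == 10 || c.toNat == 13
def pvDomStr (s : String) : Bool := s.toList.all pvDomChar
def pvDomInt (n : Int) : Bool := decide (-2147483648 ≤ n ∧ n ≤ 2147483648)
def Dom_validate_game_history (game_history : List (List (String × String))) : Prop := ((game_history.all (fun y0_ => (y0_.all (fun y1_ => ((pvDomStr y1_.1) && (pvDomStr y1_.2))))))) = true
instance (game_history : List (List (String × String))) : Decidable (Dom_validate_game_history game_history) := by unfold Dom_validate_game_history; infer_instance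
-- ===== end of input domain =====

-- B replaces A's seen-set build plus extra counting scans by ONE pass that strikes each
-- seen type off pending required/optional lists and tallies speeches; the leftovers of the
-- pending lists are the missing types. Return-value equivalence; neither version mutates input.

-- ===== PORT A =====
-- event.get('type') on an event dict (association list, first match)
def pvTypeOf (e : List (String × String)) : Option String :=
  (PySem.Dict.mk e).get? "type"

def validate_game_history (game_history : List (List (String × String))) : List String :=
  let required_events : List String := ["speech", "vote", "elimination"]
  let optional_events : List String := ["identity_claim", "seer_check", "protection_saved"]
  let event_types : PySem.Set (Option String) :=
    PySem.Set.ofList (game_history.map pvTypeOf)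
  let warnings : List String :=
    required_events.foldl (fun w req_type =>
      if some req_type ∈ event_types then w
      else w ++ ["Missing required event type: " ++ req_type]) []
  let missing_optional : List String :=
    optional_events.filter (fun opt => !(decide (some opt ∈ event_types)))
  let warnings :=
    if missing_optional ≠ [] then
      warnings ++ ["Missing optional event types: " ++ PySem.Str.join ", " missing_optional
                   ++ " (may affect advanced metrics)"]
    else warnings
  let speech_count : Int :=
    game_history.foldl (fun n e => if pvTypeOf e = some "speech" then n + 1 else n) 0
  let _vote_count : Int :=
    game_history.foldl (fun n e => if pvTypeOf e = some "vote" then n + 1 else n) 0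
  if speech_count = 0 then
    warnings ++ ["No speech events found (IRS/MSS will be unavailable)"]
  else if speech_count < 10 then
    warnings ++ ["Very few speeches (" ++ PySem.Int.toStr speech_count ++ ") - metrics may be unreliable"]
  else warnings

-- ===== PORT B =====
-- loop body: strike t off the pending lists (list.remove = List.erase, first occurrence), tally speech
def pvStrike (st : List String × List String × Int) (e : List (String × String)) :
    List String × List String × Int :=
  let t := pvTypeOf e
  let n := if t = some "speech" then st.2.2 + 1 else st.2.2
  match t with
  | some s =>
      if s ∈ st.1 then (st.1.erase s, st.2.1, n)
      else if s ∈ st.2.1 then (st.1, (st.2.1).erase s, n)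
      else (st.1, st.2.1, n)
  | none => (st.1, st.2.1, n)

def validate_game_history_alt (game_history : List (List (String × String))) : List String :=
  let st := game_history.foldl pvStrike
    (["speech", "vote", "elimination"],
     ["identity_claim", "seer_check", "protection_saved"], (0 : Int))
  let warnings : List String := st.1.map (fun r => "Missing required event type: " ++ r)
  let warnings :=
    if st.2.1 ≠ [] then
      warnings ++ ["Missing optional event types: " ++ PySem.Str.join ", " st.2.1
                   ++ " (may affect advanced metrics)"]
    else warnings
  if st.2.2 = 0 then
    warnings ++ ["No speech events found (IRS/MSS will be unavailable)"]
  else if st.2.2 < 10 then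
    warnings ++ ["Very few speeches (" ++ PySem.Int.toStr st.2.2 ++ ") - metrics may be unreliable"]
  else warnings

-- ===== PRECONDITION & SPEC =====
def Spec_validate_game_history (game_history : List (List (String × String))) (out : List String) : Prop := out = validate_game_history_alt game_history
instance (game_history : List (List (String × String))) (out : List String) : Decidable (Spec_validate_game_history game_history out) := by unfold Spec_validate_game_history; infer_instance

-- ===== CLAIM (what is proved, stated in full; the proofs are below) =====
def Claim_equal_validate_game_history : Prop := ∀ (game_history : List (List (String × String))), Dom_validate_game_history game_history → Spec_validate_game_history game_history (validate_game_history game_history)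

-- ===== LEMMAS AND PROOFS =====
-- B's single pass: the surviving pending lists are the filters by "type never seen",
-- and the counter is the number of 'speech' types.
theorem pv_strike_loop (gh : List (List (String × String))) (pr po : List String) (n : Int)
    (hpr : pr.Nodup) (hpo : po.Nodup) (hd : ∀ x ∈ pr, x ∉ po) :
    gh.foldl pvStrike (pr, po, n) =
      (pr.filter (fun x => !(decide (some x ∈ gh.map pvTypeOf))),
       po.filter (fun x => !(decide (some x ∈ gh.map pvTypeOf))),
       n + ((gh.map pvTypeOf).count (some "speech") : Int)) := by
  induction gh generalizing pr po n with
  | nil => simp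
  | cons e rest ih =>
    rcases ht : pvTypeOf e with _ | s
    all_goals simp only [List.foldl_cons, List.map_cons, List.count_cons, ht]
    · -- type is None: nothing struck, counter unchanged
      rw [show pvStrike (pr, po, n) e = (pr, po, n) by simp [pvStrike, ht]]
      rw [ih pr po n hpr hpo hd]
      simp
    · by_cases hs : s ∈ pr
      · -- struck off the required list
        have hnpo : s ∉ po := hd s hs
        rw [show pvStrike (pr, po, n) e
              = (pr.erase s, po, if s = "speech" then n + 1 else n) by
            simp [pvStrike, ht, hs]]
        rw [ih (pr.erase s) po _ (hpr.erase s)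
              hpo (fun x hx => hd x (List.mem_of_mem_erase hx))]
        rw [List.Nodup.erase_eq_filter hpr, List.filter_filter]
        refine Prod.ext ?_ (Prod.ext ?_ ?_)
        · apply List.filter_congr
          intro x _
          by_cases hxs : x = s <;> simp [hxs]
        · apply List.filter_congr
          intro x hx
          have : x ≠ s := fun h => hnpo (h ▸ hx)
          simp [this]
        · rcases eq_or_ne s "speech" with hsp | hsp <;> simp [hsp] <;> push_cast <;> ring
      · by_cases hso : s ∈ po
        · -- struck off the optional list
          rw [show pvStrike (pr, po, n) e
                = (pr, po.erase s, if s = "speech" then n + 1 else n) by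
              simp [pvStrike, ht, hs, hso]]
          rw [ih pr (po.erase s) _ hpr (hpo.erase s)
                (fun x hx hmem => hd x hx (List.mem_of_mem_erase hmem))]
          rw [List.Nodup.erase_eq_filter hpo, List.filter_filter]
          refine Prod.ext ?_ (Prod.ext ?_ ?_)
          · apply List.filter_congr
            intro x hx
            have : x ≠ s := fun h => hs (h ▸ hx)
            simp [this]
          · apply List.filter_congr
            intro x _
            by_cases hxs : x = s <;> simp [hxs]
          · rcases eq_or_ne s "speech" with hsp | hsp <;> simp [hsp] <;> push_cast <;> ring
        · -- type seen but in neither pending list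
          rw [show pvStrike (pr, po, n) e
                = (pr, po, if s = "speech" then n + 1 else n) by
              simp [pvStrike, ht, hs, hso]]
          rw [ih pr po _ hpr hpo hd]
          refine Prod.ext ?_ (Prod.ext ?_ ?_)
          · apply List.filter_congr
            intro x hx
            have : x ≠ s := fun h => hs (h ▸ hx)
            simp [this]
          · apply List.filter_congr
            intro x hx
            have : x ≠ s := fun h => hso (h ▸ hx)
            simp [this]
          · rcases eq_or_ne s "speech" with hsp | hsp <;> simp [hsp] <;> push_cast <;> ring

-- A's required-events loop is a map of the filtered list
theorem pv_req_fold (tys : List (Option String)) (l acc : List String) :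
    l.foldl (fun w r => if some r ∈ tys then w
                        else w ++ ["Missing required event type: " ++ r]) acc
      = acc ++ (l.filter (fun r => !(decide (some r ∈ tys)))).map
          (fun r => "Missing required event type: " ++ r) := by
  induction l generalizing acc with
  | nil => simp
  | cons x t ih => by_cases h : (some x : Option String) ∈ tys <;> simp [h, ih]

-- A's counting scan is the list count of the mapped type list
theorem pv_foldl_count (gh : List (List (String × String))) (n : Int) :
    gh.foldl (fun m e => if pvTypeOf e = some "speech" then m + 1 else m) n
      = n + ((gh.map pvTypeOf).count (some "speech") : Int) := by
  induction gh generalizing n with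
  | nil => simp
  | cons e t ih =>
    simp only [List.foldl_cons, List.map_cons, List.count_cons, ih]
    by_cases h : pvTypeOf e = some "speech"
    · simp [h]; ring
    · simp [h]

-- ===== VERDICT (by name: the statement is the Claim_ definition above) =====
theorem validate_game_history_spec : Claim_equal_validate_game_history := by
  intro gh _
  unfold Spec_validate_game_history validate_game_history validate_game_history_alt
  rw [pv_strike_loop gh _ _ _ (by decide) (by decide) (by decide)]
  simp only [PySem.Set.mem_ofList, pv_req_fold, pv_foldl_count, List.nil_append, zero_add]
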